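-- pv_equiv track=rewrite | github.com/stanislav-ilchev/cover | l27_6_3_4_86_turbo_safe.py | decode_blocks_from_kissat_output
-- ===== SOURCE A (Python) =====
-- V = 27
--
-- B = 86
--
-- def decode_blocks_from_kissat_output(kissat_out: str):
--     trues = set()
--     for line in kissat_out.splitlines():
--         line = line.strip()
--         if not line.startswith("v"):
--             continue
--         for tok in line.split()[1:]:
--             lit = int(tok)
--             if lit > 0:
--                 trues.add(lit)
--
--     blocks = []
--     for j in range(B):
--         base = 1 + j * V
--         blocks.append([p for p in range(V) if (base + p) in trues])
--     return blocks
-- ===== SOURCE B (Python) =====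
-- V = 27
--
-- B = 86
--
-- def decode_blocks_from_kissat_output(kissat_out: str):
--     trues = set()
--     for line in kissat_out.splitlines():
--         line = line.strip()
--         if not line.startswith("v"):
--             continue
--         for tok in line.split()[1:]:
--             lit = int(tok)
--             if lit > 0:
--                 trues.add(lit)
--
--     blocks = [[] for _ in range(B)]
--     for lit in sorted(trues):
--         j, p = divmod(lit - 1, V)
--         if j < B:
--             blocks[j].append(p)
--     return blocks
-- ===== Notes on version B (the rewrite author's own statement) =====
-- stated objective: alternative
-- what changed: The second phase no longer probes the set for each of the B*V=2322 candidate cells; B scatters each true literal once into its bucket via divmod, iterating sorted(trues) so buckets come out in the same ascending order.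
import Mathlib
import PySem

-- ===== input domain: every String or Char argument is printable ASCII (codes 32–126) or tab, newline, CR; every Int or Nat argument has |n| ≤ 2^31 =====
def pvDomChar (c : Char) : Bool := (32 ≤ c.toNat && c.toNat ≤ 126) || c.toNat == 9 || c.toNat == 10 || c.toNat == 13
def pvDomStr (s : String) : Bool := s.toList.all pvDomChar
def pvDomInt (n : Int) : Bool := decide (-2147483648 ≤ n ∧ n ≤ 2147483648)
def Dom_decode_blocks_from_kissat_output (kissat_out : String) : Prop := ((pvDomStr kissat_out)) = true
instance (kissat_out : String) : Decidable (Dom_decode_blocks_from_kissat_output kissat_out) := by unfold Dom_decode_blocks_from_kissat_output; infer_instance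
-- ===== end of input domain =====

-- B scatters each true literal into its block by divmod instead of probing the set for all B*V cells; buckets come out ascending by iterating sorted(trues).

-- ===== PORT A =====
-- the parsing loop (identical, line for line, in both Pythons): collect positive literals of "v" lines
def pvParseLine (trues : PySem.Set Int) (line : String) : PySem.Set Int :=
  let s := PySem.Str.strip line
  if PySem.Str.startswith s "v" then
    ((PySem.Str.split₀ s).drop 1).foldl (fun t tok =>
      let lit := (PySem.Int.ofStr? tok).getD 0   -- int(tok); Pre_ guarantees ofStr? = some
      if lit > 0 then PySem.Set.add t lit else t) trues
  else trues

def pvTrues (kissat_out : String) : PySem.Set Int :=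
  (PySem.Str.splitlines kissat_out).foldl pvParseLine PySem.Set.empty

def decode_blocks_from_kissat_output (kissat_out : String) : List (List Int) :=
  let trues := pvTrues kissat_out
  (PySem.List.pyRange 0 86 1).foldl (fun blocks j =>
    let base := 1 + j * 27
    blocks ++ [(PySem.List.pyRange 0 27 1).filter (fun p => PySem.Set.contains trues (base + p))]) []

-- ===== PORT B =====
def decode_blocks_from_kissat_output_alt (kissat_out : String) : List (List Int) :=
  let trues := pvTrues kissat_out
  let blocks0 : List (List Int) := List.replicate 86 []
  (PySem.List.sorted trues (fun x => x) false).foldl (fun blocks lit =>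
    let j := PySem.Int.floordiv (lit - 1) 27
    let p := PySem.Int.mod (lit - 1) 27
    if j < 86 then PySem.List.pySetD blocks j (PySem.List.pyGetD blocks j [] ++ [p]) else blocks) blocks0

-- ===== PRECONDITION & SPEC =====
-- Pre_ excludes exactly the inputs where int(tok) raises ValueError (a non-integer token after the leading "v" of a "v"-line); both Pythons raise there.
def Pre_decode_blocks_from_kissat_output (kissat_out : String) : Prop :=
  ∀ line ∈ PySem.Str.splitlines kissat_out,
    PySem.Str.startswith (PySem.Str.strip line) "v" = true →
    ∀ tok ∈ (PySem.Str.split₀ (PySem.Str.strip line)).drop 1, (PySem.Int.ofStr? tok).isSome = true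
instance (kissat_out : String) : Decidable (Pre_decode_blocks_from_kissat_output kissat_out) := by
  unfold Pre_decode_blocks_from_kissat_output; infer_instance
def pvWitness_decode_blocks_from_kissat_output : String := "c comment\nv 1 28 -3 0"

def Spec_decode_blocks_from_kissat_output (kissat_out : String) (out : List (List Int)) : Prop := out = decode_blocks_from_kissat_output_alt kissat_out
instance (kissat_out : String) (out : List (List Int)) : Decidable (Spec_decode_blocks_from_kissat_output kissat_out out) := by unfold Spec_decode_blocks_from_kissat_output; infer_instance

-- ===== CLAIM (what is proved, stated in full; the proofs are below) =====
def Claim_equal_decode_blocks_from_kissat_output : Prop := ∀ (kissat_out : String), Dom_decode_blocks_from_kissat_output kissat_out → Pre_decode_blocks_from_kissat_output kissat_out → Spec_decode_blocks_from_kissat_output kissat_out (decode_blocks_from_kissat_output kissat_out)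

-- ===== LEMMAS AND PROOFS =====

theorem pvWitness_ok : Dom_decode_blocks_from_kissat_output pvWitness_decode_blocks_from_kissat_output ∧ Pre_decode_blocks_from_kissat_output pvWitness_decode_blocks_from_kissat_output := by
  constructor <;> decide

-- B's scatter step, named for the proofs (definitionally the lambda in the port)
def pvStep (blocks : List (List Int)) (lit : Int) : List (List Int) :=
  let j := PySem.Int.floordiv (lit - 1) 27
  let p := PySem.Int.mod (lit - 1) 27
  if j < 86 then PySem.List.pySetD blocks j (PySem.List.pyGetD blocks j [] ++ [p]) else blocks

-- every element ever added by the token loop is positive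
theorem pvTokFold_mem (toks : List String) (t : PySem.Set Int) (x : Int)
    (hx : x ∈ toks.foldl (fun t tok =>
      let lit := (PySem.Int.ofStr? tok).getD 0
      if lit > 0 then PySem.Set.add t lit else t) t) : x ∈ t ∨ 0 < x := by
  induction toks generalizing t with
  | nil => exact .inl hx
  | cons tok toks ih =>
    simp only [List.foldl_cons] at hx
    rcases ih _ hx with h | h
    · by_cases hlit : (PySem.Int.ofStr? tok).getD 0 > 0
      · simp only [if_pos hlit, PySem.Set.mem_add] at h
        rcases h with h | h
        · exact .inl h
        · exact .inr (h ▸ hlit)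
      · simp only [if_neg hlit] at h; exact .inl h
    · exact .inr h

theorem pvTokFold_nodup (toks : List String) (t : PySem.Set Int) (ht : t.Nodup) :
    (toks.foldl (fun t tok =>
      let lit := (PySem.Int.ofStr? tok).getD 0
      if lit > 0 then PySem.Set.add t lit else t) t).Nodup := by
  induction toks generalizing t with
  | nil => exact ht
  | cons tok toks ih =>
    simp only [List.foldl_cons]
    apply ih
    by_cases hlit : (PySem.Int.ofStr? tok).getD 0 > 0
    · simp only [if_pos hlit]; exact PySem.Set.nodup_add _ _ ht
    · simpa [if_neg hlit] using ht

theorem pvParseLine_mem (t : PySem.Set Int) (line : String) (x : Int)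
    (hx : x ∈ pvParseLine t line) : x ∈ t ∨ 0 < x := by
  unfold pvParseLine at hx
  by_cases h : PySem.Str.startswith (PySem.Str.strip line) "v" = true
  · simp only [h, if_true] at hx; exact pvTokFold_mem _ _ _ hx
  · simp only [eq_false_of_ne_true h] at hx
    simp only [Bool.false_eq_true, if_false] at hx
    exact .inl hx

theorem pvParseLine_nodup (t : PySem.Set Int) (line : String) (ht : t.Nodup) :
    (pvParseLine t line).Nodup := by
  unfold pvParseLine
  by_cases h : PySem.Str.startswith (PySem.Str.strip line) "v" = true
  · simp only [h, if_true]; exact pvTokFold_nodup _ _ ht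
  · simp only [eq_false_of_ne_true h]; simpa using ht

theorem pvTrues_pos (kissat_out : String) : ∀ x ∈ pvTrues kissat_out, 0 < x := by
  unfold pvTrues
  generalize (PySem.Str.splitlines kissat_out) = lines
  have : ∀ (t : PySem.Set Int), (∀ x ∈ t, 0 < x) →
      ∀ x ∈ lines.foldl pvParseLine t, 0 < x := by
    induction lines with
    | nil => intro t ht x hx; exact ht x hx
    | cons l ls ih =>
      intro t ht x hx
      simp only [List.foldl_cons] at hx
      refine ih _ (fun y hy => ?_) x hx
      rcases pvParseLine_mem _ _ _ hy with h | h
      · exact ht y h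
      · exact h
  exact this [] (by simp)

theorem pvTrues_nodup (kissat_out : String) : (pvTrues kissat_out).Nodup := by
  unfold pvTrues
  generalize (PySem.Str.splitlines kissat_out) = lines
  have : ∀ (t : PySem.Set Int), t.Nodup → (lines.foldl pvParseLine t).Nodup := by
    induction lines with
    | nil => exact fun t ht => ht
    | cons l ls ih => intro t ht; exact ih _ (pvParseLine_nodup _ _ ht)
  exact this [] (by simp)

theorem pvGetD_set_self {α : Type} (l : List α) (i : Nat) (h : i < l.length) (d v : α) :
    (l.set i v).getD i d = v := by
  simp [List.getD_eq_getElem?_getD, List.getElem?_set_self h]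

theorem pvGetD_set_ne {α : Type} (l : List α) {i k : Nat} (h : i ≠ k) (d v : α) :
    (l.set i v).getD k d = l.getD k d := by
  simp [List.getD_eq_getElem?_getD, List.getElem?_set_ne h]

-- characterisation of the scatter loop
theorem pvScatter_spec (L : List Int) :
    ∀ (bs : List (List Int)), bs.length = 86 → (∀ x ∈ L, 0 < x) →
    L.foldl pvStep bs = (List.range 86).map (fun k => bs.getD k [] ++
      (L.filter (fun lit => decide (PySem.Int.floordiv (lit - 1) 27 = (k : Int)))).map
        (fun lit => PySem.Int.mod (lit - 1) 27)) := by
  induction L with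
  | nil =>
    intro bs hlen _
    simp only [List.foldl_nil, List.filter_nil, List.map_nil, List.append_nil]
    apply List.ext_getElem (by simp [hlen])
    intro i h1 h2
    simp only [List.getElem_map, List.getElem_range]
    rw [List.getD_eq_getElem?_getD, List.getElem?_eq_getElem h1]
    rfl
  | cons lit L ih =>
    intro bs hlen hpos
    have hlit : 0 < lit := hpos _ List.mem_cons_self
    have hposL : ∀ x ∈ L, 0 < x := fun x hx => hpos x (List.mem_cons_of_mem _ hx)
    have hjd : PySem.Int.floordiv (lit - 1) 27 = (lit - 1) / 27 :=
      PySem.Int.floordiv_eq_ediv_of_pos (by norm_num)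
    have hj0 : 0 ≤ PySem.Int.floordiv (lit - 1) 27 := by
      rw [hjd]; exact Int.ediv_nonneg (by omega) (by norm_num)
    simp only [List.foldl_cons]
    by_cases hlt : PySem.Int.floordiv (lit - 1) 27 < 86
    · have hstep : pvStep bs lit = bs.set (PySem.Int.floordiv (lit - 1) 27).toNat
          (bs.getD (PySem.Int.floordiv (lit - 1) 27).toNat [] ++ [PySem.Int.mod (lit - 1) 27]) := by
        unfold pvStep
        rw [if_pos hlt, PySem.List.pySetD_of_nonneg _ _ hj0, PySem.List.pyGetD_of_nonneg _ _ hj0]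
      rw [hstep, ih _ (by simp [hlen]) hposL]
      apply List.map_congr_left
      intro k hk
      rw [List.mem_range] at hk
      by_cases hkj : (k : Int) = PySem.Int.floordiv (lit - 1) 27
      · have hkt : (PySem.Int.floordiv (lit - 1) 27).toNat = k := by omega
        rw [List.filter_cons_of_pos (by simp; omega), List.map_cons, hkt,
          pvGetD_set_self _ _ (by omega) _ _]
        simp
      · rw [List.filter_cons_of_neg (by simp; omega),
          pvGetD_set_ne _ (by omega) _ _]
    · have hstep : pvStep bs lit = bs := by unfold pvStep; rw [if_neg hlt]
      rw [hstep, ih _ hlen hposL]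
      apply List.map_congr_left
      intro k hk
      rw [List.mem_range] at hk
      rw [List.filter_cons_of_neg (by simp; omega)]

-- one column: the sorted-scatter column equals A's probe of the 27 cells
theorem pvColumn_eq (T : List Int) (hnd : T.Nodup) (hpos : ∀ x ∈ T, 0 < x) (k : Nat) :
    ((PySem.List.sorted T (fun x => x) false).filter
        (fun lit => decide (PySem.Int.floordiv (lit - 1) 27 = (k : Int)))).map
      (fun lit => PySem.Int.mod (lit - 1) 27)
    = (PySem.List.pyRange 0 27 1).filter (fun p => PySem.Set.contains T (1 + (k : Int) * 27 + p)) := by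
  have h27 : (0 : Int) < 27 := by norm_num
  have hSperm : (PySem.List.sorted T (fun x => x) false).Perm T := PySem.List.sorted_perm T _ false
  have hSnd : (PySem.List.sorted T (fun x => x) false).Nodup := hSperm.nodup_iff.mpr hnd
  have hSlt : (PySem.List.sorted T (fun x => x) false).Pairwise (· < ·) :=
    ((PySem.List.sorted_pairwise T (fun x => x)).and hSnd).imp
      (fun h => lt_of_le_of_ne h.1 h.2)
  have hFlt := hSlt.filter (fun lit => decide (PySem.Int.floordiv (lit - 1) 27 = (k : Int)))
  have hMlt : (((PySem.List.sorted T (fun x => x) false).filter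
        (fun lit => decide (PySem.Int.floordiv (lit - 1) 27 = (k : Int)))).map
      (fun lit => PySem.Int.mod (lit - 1) 27)).Pairwise (· < ·) := by
    rw [List.pairwise_map]
    refine hFlt.imp_of_mem (fun {a b} ha hb hab => ?_)
    rw [List.mem_filter, decide_eq_true_iff, PySem.Int.floordiv_eq_ediv_of_pos h27] at ha hb
    rw [PySem.Int.mod_eq_emod_of_pos h27, PySem.Int.mod_eq_emod_of_pos h27]
    omega
  have hRlt : ((PySem.List.pyRange 0 27 1).filter
      (fun p => PySem.Set.contains T (1 + (k : Int) * 27 + p))).Pairwise (· < ·) :=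
    (PySem.List.pairwise_lt_pyRange_one 0 27).filter _
  refine List.Perm.eq_of_pairwise (fun a b _ _ h1 h2 => absurd h2 (lt_asymm h1)) hMlt hRlt ?_
  rw [List.perm_ext_iff_of_nodup (hMlt.imp (fun h => ne_of_lt h)) (hRlt.imp (fun h => ne_of_lt h))]
  intro x
  simp only [List.mem_map, List.mem_filter, PySem.List.mem_sorted, decide_eq_true_iff,
    PySem.List.mem_pyRange_one, PySem.Set.contains_iff, PySem.Int.floordiv_eq_ediv_of_pos h27,
    PySem.Int.mod_eq_emod_of_pos h27]
  constructor
  · rintro ⟨a, ⟨haT, hak⟩, rfl⟩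
    have := hpos a haT
    refine ⟨⟨by omega, by omega⟩, ?_⟩
    have : 1 + (k : Int) * 27 + (a - 1) % 27 = a := by omega
    rwa [this]
  · rintro ⟨⟨hx0, hx27⟩, hmem⟩
    exact ⟨1 + (k : Int) * 27 + x, ⟨hmem, by omega⟩, by omega⟩

-- ===== VERDICT (by name: the statement is the Claim_ definition above) =====
theorem decode_blocks_from_kissat_output_spec : Claim_equal_decode_blocks_from_kissat_output := by
  intro kissat_out _ _
  unfold Spec_decode_blocks_from_kissat_output
  unfold decode_blocks_from_kissat_output decode_blocks_from_kissat_output_alt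
  simp only []
  rw [show (fun (blocks : List (List Int)) (lit : Int) =>
        let j := PySem.Int.floordiv (lit - 1) 27
        let p := PySem.Int.mod (lit - 1) 27
        if j < 86 then PySem.List.pySetD blocks j (PySem.List.pyGetD blocks j [] ++ [p]) else blocks)
      = pvStep from rfl]
  rw [pvScatter_spec _ _ (by simp)
      (fun x hx => pvTrues_pos kissat_out x ((PySem.List.mem_sorted _ _ _ _).mp hx))]
  rw [PySem.List.foldl_append_singleton_eq_map
      (f := fun j => (PySem.List.pyRange 0 27 1).filter
        (fun p => PySem.Set.contains (pvTrues kissat_out) (1 + j * 27 + p)))]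
  rw [List.nil_append, show (86 : Int) = ((86 : Nat) : Int) by norm_num,
    PySem.List.pyRange_zero_nat, List.map_map]
  apply List.map_congr_left
  intro k hk
  rw [List.mem_range] at hk
  rw [List.getD_eq_getElem?_getD, List.getElem?_replicate, if_pos hk]
  simp only [Option.getD_some, List.nil_append, Function.comp]
  exact (pvColumn_eq _ (pvTrues_nodup kissat_out) (pvTrues_pos kissat_out) k).symm
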